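-- pv_equiv track=rewrite | github.com/1r0nw1ll/quantum-arithmetic-research | qa_algorithm_competency_batch3.py | qa_orbit_family
-- ===== SOURCE A (Python) =====
-- MODULUS = 9
--
-- def qa_step(b,e,m=MODULUS): return e%m,(b+e)%m
--
-- def qa_orbit_family(b,e,m=MODULUS,max_steps=500):
--     seen,state={},((b%m),(e%m))
--     for t in range(max_steps):
--         if state in seen:
--             p=t-seen[state]
--             return "singularity" if p==1 else "satellite" if p==8 else "cosmos" if p==24 else f"period_{p}"
--         seen[state]=t; state=qa_step(*state,m)
--     return "unknown"
-- ===== SOURCE B (Python) =====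
-- MODULUS = 9
--
-- def qa_step(b, e, m=MODULUS):
--     return e % m, (b + e) % m
--
-- def qa_orbit_family(b, e, m=MODULUS, max_steps=500):
--     # Lazy pipeline: stream the orbit states after the start and take the 1-based
--     # position of the first one equal to the start (the step map is a bijection
--     # on reduced pairs, so the first repeat is always the start); classification
--     # is a literal dict lookup.
--     start = (b % m, e % m)
--     def orbit():
--         s = start
--         for _ in range(max_steps - 1):
--             s = qa_step(*s, m)
--             yield s
--     p = next((k for k, s in enumerate(orbit(), 1) if s == start), None)
--     if p is None:
--         return "unknown"
--     return {1: "singularity", 8: "satellite", 24: "cosmos"}.get(p, f"period_{p}")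
-- ===== Notes on version B (the rewrite author's own statement) =====
-- stated objective: alternative
-- what changed: Replaces A's stateful pass with a seen-dictionary by a constant-space lazy pipeline: stream the orbit states after the start and take (via enumerate/next) the 1-based position of the first one equal to the start, which is the period because the step map is a bijection on reduced pairs, then classify through a literal dict lookup.
import Mathlib
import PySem

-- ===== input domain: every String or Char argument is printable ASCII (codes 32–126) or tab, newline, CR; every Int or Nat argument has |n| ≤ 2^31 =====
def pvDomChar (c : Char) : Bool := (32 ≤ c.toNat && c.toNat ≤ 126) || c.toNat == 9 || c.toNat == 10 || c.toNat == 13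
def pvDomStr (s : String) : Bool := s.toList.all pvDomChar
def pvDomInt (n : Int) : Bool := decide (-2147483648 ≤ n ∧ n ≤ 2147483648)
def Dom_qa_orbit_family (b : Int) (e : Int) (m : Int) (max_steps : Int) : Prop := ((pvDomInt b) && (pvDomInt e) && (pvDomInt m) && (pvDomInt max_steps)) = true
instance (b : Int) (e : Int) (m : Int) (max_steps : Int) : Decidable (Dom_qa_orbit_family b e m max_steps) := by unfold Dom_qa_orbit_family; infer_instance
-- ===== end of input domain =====

-- B replaces A's online pass with a seen-dictionary by a lazy pipeline: stream
-- the orbit states after the start and take the 1-based position of the first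
-- one equal to the start (sound because the step map is a bijection on reduced
-- pairs, so the first repeat is always the start), then classify that period
-- through a literal dict lookup; objective: alternative.

-- ===== PORT A =====
def qa_stepA (b e m : Int) : Int × Int := (PySem.Int.mod e m, PySem.Int.mod (b + e) m)

def qa_classifyA (p : Int) : String :=
  if p = 1 then "singularity"
  else if p = 8 then "satellite"
  else if p = 24 then "cosmos"
  else "period_" ++ PySem.Int.toStr p

def qa_loopA (m : Int) (seen : PySem.Dict (Int × Int) Int) (state : Int × Int)
    (t : Int) (fuel : Nat) : String :=
  match fuel with
  | 0 => "unknown"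
  | Nat.succ f =>
    match seen.get? state with
    | some s => qa_classifyA (t - s)
    | none => qa_loopA m (seen.insert state t) (qa_stepA state.1 state.2 m) (t + 1) f

def qa_orbit_family (b : Int) (e : Int) (m : Int) (max_steps : Int) : String :=
  qa_loopA m PySem.Dict.empty (PySem.Int.mod b m, PySem.Int.mod e m) 0 max_steps.toNat

-- ===== PORT B =====
def qa_stepB (b e m : Int) : Int × Int := (PySem.Int.mod e m, PySem.Int.mod (b + e) m)

-- the search in the lazy stream: 1-based position of the first orbit state
-- after s equal to start (none = stream exhausted)
def qa_findB (m : Int) (start s : Int × Int) (k : Int) : Nat → Option Int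
  | 0 => none
  | Nat.succ f =>
    let s' := qa_stepB s.1 s.2 m
    if s' = start then some k else qa_findB m start s' (k + 1) f

def qa_orbit_family_alt (b : Int) (e : Int) (m : Int) (max_steps : Int) : String :=
  let start := (PySem.Int.mod b m, PySem.Int.mod e m)
  match qa_findB m start start 1 (max_steps - 1).toNat with
  | none => "unknown"
  | some p =>
      ((((PySem.Dict.empty.insert (1 : Int) "singularity").insert 8 "satellite").insert
          24 "cosmos").getD p ("period_" ++ PySem.Int.toStr p))

-- ===== PRECONDITION & SPEC =====
-- Pre_ excludes m = 0, on which A raises ZeroDivisionError (b % m).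
def Pre_qa_orbit_family (b : Int) (e : Int) (m : Int) (max_steps : Int) : Prop := m ≠ 0
instance (b : Int) (e : Int) (m : Int) (max_steps : Int) : Decidable (Pre_qa_orbit_family b e m max_steps) := by unfold Pre_qa_orbit_family; infer_instance

def pvWitness_qa_orbit_family : Int × Int × Int × Int := (1, 2, 9, 500)

def Spec_qa_orbit_family (b : Int) (e : Int) (m : Int) (max_steps : Int) (out : String) : Prop := out = qa_orbit_family_alt b e m max_steps
instance (b : Int) (e : Int) (m : Int) (max_steps : Int) (out : String) : Decidable (Spec_qa_orbit_family b e m max_steps out) := by unfold Spec_qa_orbit_family; infer_instance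

-- ===== CLAIM (what is proved, stated in full; the proofs are below) =====
def Claim_equal_qa_orbit_family : Prop := ∀ (b : Int) (e : Int) (m : Int) (max_steps : Int), Dom_qa_orbit_family b e m max_steps → Pre_qa_orbit_family b e m max_steps → Spec_qa_orbit_family b e m max_steps (qa_orbit_family b e m max_steps)

-- ===== LEMMAS AND PROOFS =====

-- proof-only helper: B's mathematics written as a single recursive comparison
-- loop (used only as a bridge between the two ports)
def qa_classifyC (k : Int) : String :=
  if k = 1 then "singularity"
  else if k = 8 then "satellite"
  else if k = 24 then "cosmos"
  else "period_" ++ PySem.Int.toStr k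

def qa_loopC (m : Int) (start cur : Int × Int) (k : Int) (fuel : Nat) : String :=
  match fuel with
  | 0 => "unknown"
  | Nat.succ f =>
    if cur = start then qa_classifyC k
    else qa_loopC m start (qa_stepB cur.1 cur.2 m) (k + 1) f

-- the orbit of the reduced start state under the step map
def qa_orbit (b e m : Int) : Nat → Int × Int
  | 0 => (PySem.Int.mod b m, PySem.Int.mod e m)
  | Nat.succ i => qa_stepA (qa_orbit b e m i).1 (qa_orbit b e m i).2 m

-- the orbit segment [orbit t, …, orbit (t+n-1)]
def qa_orbitList (b e m : Int) (t n : Nat) : List (Int × Int) :=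
  (List.range n).map (fun i => qa_orbit b e m (t + i))

lemma classify_eq (p : Int) : qa_classifyA p = qa_classifyC p := rfl

lemma dvd_sub_mod (a m : Int) : m ∣ a - PySem.Int.mod a m := by
  have h := PySem.Int.floordiv_mul_add_mod a m
  exact ⟨PySem.Int.floordiv a m, by linarith⟩

lemma mod_congr {a c m : Int} (hm : m ≠ 0) (h : m ∣ a - c) :
    PySem.Int.mod a m = PySem.Int.mod c m := by
  have h1 := dvd_sub_mod a m
  have h2 := dvd_sub_mod c m
  have hd : m ∣ PySem.Int.mod a m - PySem.Int.mod c m := by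
    have : PySem.Int.mod a m - PySem.Int.mod c m
        = (a - c) - (a - PySem.Int.mod a m) + (c - PySem.Int.mod c m) := by ring
    rw [this]
    exact dvd_add (dvd_sub h h1) h2
  have habs : |PySem.Int.mod a m - PySem.Int.mod c m| < |m| := by
    rcases lt_or_gt_of_ne hm with hneg | hpos
    · have ba := PySem.Int.mod_neg_bounds a hneg
      have bc := PySem.Int.mod_neg_bounds c hneg
      rw [abs_of_neg hneg]
      rcases abs_cases (PySem.Int.mod a m - PySem.Int.mod c m) with ⟨he, _⟩ | ⟨he, _⟩ <;> omega
    · have ba1 := PySem.Int.mod_nonneg a hpos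
      have ba2 := PySem.Int.mod_lt a hpos
      have bc1 := PySem.Int.mod_nonneg c hpos
      have bc2 := PySem.Int.mod_lt c hpos
      rw [abs_of_pos hpos]
      rcases abs_cases (PySem.Int.mod a m - PySem.Int.mod c m) with ⟨he, _⟩ | ⟨he, _⟩ <;> omega
  have := Int.eq_zero_of_abs_lt_dvd ((abs_dvd _ _).mpr hd) habs
  omega

lemma mod_eq_iff_dvd {a c m : Int} (hm : m ≠ 0) :
    PySem.Int.mod a m = PySem.Int.mod c m ↔ m ∣ a - c := by
  constructor
  · intro h
    have h1 := dvd_sub_mod a m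
    have h2 := dvd_sub_mod c m
    have hh : a - c = ((a - PySem.Int.mod a m) - (c - PySem.Int.mod c m))
        + (PySem.Int.mod a m - PySem.Int.mod c m) := by ring
    rw [hh]
    exact dvd_add (dvd_sub h1 h2) (by rw [h]; simp)
  · exact mod_congr hm

lemma mod_idem {a m : Int} (hm : m ≠ 0) :
    PySem.Int.mod (PySem.Int.mod a m) m = PySem.Int.mod a m :=
  mod_congr hm (by simpa [neg_sub] using dvd_neg.mpr (dvd_sub_mod a m))

-- every orbit state is reduced: its components are fixed by % m
lemma orbit_red (b e m : Int) (hm : m ≠ 0) (i : Nat) :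
    PySem.Int.mod (qa_orbit b e m i).1 m = (qa_orbit b e m i).1 ∧
    PySem.Int.mod (qa_orbit b e m i).2 m = (qa_orbit b e m i).2 := by
  cases i with
  | zero => exact ⟨mod_idem hm, mod_idem hm⟩
  | succ j => exact ⟨mod_idem hm, mod_idem hm⟩

-- the step map is injective on reduced states
lemma step_inj {x y : Int × Int} {m : Int} (hm : m ≠ 0)
    (hx1 : PySem.Int.mod x.1 m = x.1) (hx2 : PySem.Int.mod x.2 m = x.2)
    (hy1 : PySem.Int.mod y.1 m = y.1) (hy2 : PySem.Int.mod y.2 m = y.2)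
    (h : qa_stepA x.1 x.2 m = qa_stepA y.1 y.2 m) : x = y := by
  have h1 : PySem.Int.mod x.2 m = PySem.Int.mod y.2 m := congrArg Prod.fst h
  have h2 : PySem.Int.mod (x.1 + x.2) m = PySem.Int.mod (y.1 + y.2) m := congrArg Prod.snd h
  have e2 : x.2 = y.2 := by rw [← hx2, h1, hy2]
  have hd : m ∣ (x.1 + x.2) - (y.1 + y.2) := (mod_eq_iff_dvd hm).mp h2
  have hd1 : m ∣ x.1 - y.1 := by
    have : x.1 - y.1 = (x.1 + x.2) - (y.1 + y.2) := by rw [e2]; ring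
    rw [this]; exact hd
  have e1 : x.1 = y.1 := by rw [← hx1, mod_congr hm hd1, hy1]
  exact Prod.ext e1 e2

lemma orbit_cancel (b e m : Int) (hm : m ≠ 0) (d a c : Nat)
    (h : qa_orbit b e m (a + d) = qa_orbit b e m (c + d)) :
    qa_orbit b e m a = qa_orbit b e m c := by
  induction d with
  | zero => simpa using h
  | succ n ih =>
    apply ih
    have ha := orbit_red b e m hm (a + n)
    have hc := orbit_red b e m hm (c + n)
    have h' : qa_stepA (qa_orbit b e m (a + n)).1 (qa_orbit b e m (a + n)).2 m
            = qa_stepA (qa_orbit b e m (c + n)).1 (qa_orbit b e m (c + n)).2 m := by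
      have e1 : a + (n + 1) = (a + n) + 1 := by omega
      have e2 : c + (n + 1) = (c + n) + 1 := by omega
      rw [e1, e2] at h
      simpa [qa_orbit] using h
    exact step_inj hm ha.1 ha.2 hc.1 hc.2 h'

-- if an earlier orbit state recurs, the start state recurs at the difference
lemma orbit_back (b e m : Int) (hm : m ≠ 0) {j tn : Nat} (hj : j ≤ tn)
    (h : qa_orbit b e m j = qa_orbit b e m tn) :
    qa_orbit b e m 0 = qa_orbit b e m (tn - j) := by
  have h' : qa_orbit b e m ((tn - j) + j) = qa_orbit b e m (0 + j) := by
    have eq1 : (tn - j) + j = tn := by omega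
    rw [eq1]
    simpa using h.symm
  exact (orbit_cancel b e m hm j (tn - j) 0 h').symm

-- A's dict loop equals the comparison loop, by induction on the shared fuel
lemma loop_eq (b e m : Int) (hm : m ≠ 0) :
    ∀ (fuel : Nat) (tn : Nat) (seen : PySem.Dict (Int × Int) Int),
    1 ≤ tn →
    (∀ i : Nat, i < tn → seen.get? (qa_orbit b e m i) = some (i : Int)) →
    (∀ x v, seen.get? x = some v → ∃ j, j < tn ∧ qa_orbit b e m j = x) →
    (∀ k : Nat, 1 ≤ k → k < tn → qa_orbit b e m k ≠ qa_orbit b e m 0) →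
    qa_loopA m seen (qa_orbit b e m tn) (tn : Int) fuel
      = qa_loopC m (qa_orbit b e m 0) (qa_orbit b e m tn) (tn : Int) fuel := by
  intro fuel
  induction fuel with
  | zero => intro tn seen _ _ _ _; rfl
  | succ f ih =>
    intro tn seen htn h1 h2 h3
    have hdist : ∀ j, j < tn → qa_orbit b e m tn ≠ qa_orbit b e m 0 →
        qa_orbit b e m j ≠ qa_orbit b e m tn := by
      intro j hj hne hcontra
      have hb := orbit_back b e m hm (le_of_lt hj) hcontra
      rcases Nat.eq_zero_or_pos j with hj0 | hj1
      · subst hj0; simp at hb; exact hne (by simpa using hcontra.symm)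
      · exact h3 (tn - j) (by omega) (by omega) hb.symm
    by_cases hc : qa_orbit b e m tn = qa_orbit b e m 0
    · have hget : seen.get? (qa_orbit b e m tn) = some ((0 : Nat) : Int) := by
        rw [hc]; exact h1 0 htn
      simp only [qa_loopA, qa_loopC, hget]
      rw [if_pos hc, classify_eq]
      norm_num
    · have hget : seen.get? (qa_orbit b e m tn) = none := by
        cases hg : seen.get? (qa_orbit b e m tn) with
        | none => rfl
        | some v =>
          rcases h2 _ _ hg with ⟨j, hj, hje⟩
          exact absurd hje (hdist j hj hc)
      simp only [qa_loopA, qa_loopC, hget, if_neg hc]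
      have hstep : qa_stepA (qa_orbit b e m tn).1 (qa_orbit b e m tn).2 m
          = qa_orbit b e m (tn + 1) := rfl
      have hstepB : qa_stepB (qa_orbit b e m tn).1 (qa_orbit b e m tn).2 m
          = qa_orbit b e m (tn + 1) := rfl
      rw [hstep, hstepB]
      have hcast : ((tn : Int) + 1) = ((tn + 1 : Nat) : Int) := by push_cast; ring
      rw [hcast]
      apply ih (tn + 1)
      · omega
      · intro i hi
        by_cases hie : i = tn
        · subst hie
          rw [PySem.Dict.get?_insert_self]
        · have hilt : i < tn := by omega
          rw [PySem.Dict.get?_insert_of_ne _ _ (hdist i hilt hc)]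
          exact h1 i hilt
      · intro x v hg
        by_cases hxe : x = qa_orbit b e m tn
        · exact ⟨tn, by omega, hxe.symm⟩
        · rw [PySem.Dict.get?_insert_of_ne _ _ hxe] at hg
          rcases h2 x v hg with ⟨j, hj, hje⟩
          exact ⟨j, by omega, hje⟩
      · intro k hk1 hk2
        by_cases hke : k = tn
        · subst hke; exact hc
        · exact h3 k hk1 (by omega)

-- splitting off the head of an orbit segment
lemma orbitList_succ (b e m : Int) (t n : Nat) :
    qa_orbitList b e m t (n + 1) = qa_orbit b e m t :: qa_orbitList b e m (t + 1) n := by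
  unfold qa_orbitList
  rw [List.range_succ_eq_map]
  simp only [List.map_cons, List.map_map, Nat.add_zero]
  congr 1
  apply List.map_congr_left
  intro i _
  simp only [Function.comp_apply]
  congr 1
  omega

-- B's stream search is first-index search in the orbit segment
lemma find_eq (b e m : Int) :
    ∀ (n t : Nat) (k : Int),
    qa_findB m (qa_orbit b e m 0) (qa_orbit b e m t) k n
      = (PySem.List.index? (qa_orbitList b e m (t + 1) n) (qa_orbit b e m 0)).map
          (fun (i : Nat) => k + (i : Int)) := by
  intro n
  induction n with
  | zero =>
    intro t k
    simp [qa_findB, qa_orbitList, PySem.List.index?_eq_idxOf?]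
  | succ f ih =>
    intro t k
    rw [orbitList_succ]
    have hstep : qa_stepB (qa_orbit b e m t).1 (qa_orbit b e m t).2 m
        = qa_orbit b e m (t + 1) := rfl
    simp only [qa_findB, hstep]
    by_cases hc : qa_orbit b e m (t + 1) = qa_orbit b e m 0
    · rw [if_pos hc, show qa_orbit b e m (t + 1) :: qa_orbitList b e m (t + 1 + 1) f
          = qa_orbit b e m 0 :: qa_orbitList b e m (t + 1 + 1) f from by rw [hc]]
      rw [PySem.List.index?_cons_self]
      simp
    · rw [if_neg hc, PySem.List.index?_cons_of_ne _ (fun h => hc h), ih (t + 1) (k + 1)]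
      cases PySem.List.index? (qa_orbitList b e m (t + 1 + 1) f) (qa_orbit b e m 0) with
      | none => rfl
      | some i =>
        simp only [Option.map_some]
        congr 1
        push_cast
        ring

-- the comparison loop is first-index search in the orbit segment
lemma loopC_eq_index (b e m : Int) :
    ∀ (n t : Nat),
    qa_loopC m (qa_orbit b e m 0) (qa_orbit b e m t) (t : Int) n
      = match PySem.List.index? (qa_orbitList b e m t n) (qa_orbit b e m 0) with
        | none => "unknown"
        | some i => qa_classifyC ((t : Int) + i) := by
  intro n
  induction n with
  | zero =>
    intro t
    simp [qa_loopC, qa_orbitList, PySem.List.index?_eq_idxOf?]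
  | succ f ih =>
    intro t
    rw [orbitList_succ]
    by_cases hc : qa_orbit b e m t = qa_orbit b e m 0
    · rw [show qa_orbit b e m t :: qa_orbitList b e m (t + 1) f
          = qa_orbit b e m 0 :: qa_orbitList b e m (t + 1) f from by rw [hc]]
      rw [PySem.List.index?_cons_self]
      simp only [qa_loopC, if_pos hc]
      norm_num
    · rw [PySem.List.index?_cons_of_ne _ (fun h => hc h)]
      have hstep : qa_stepB (qa_orbit b e m t).1 (qa_orbit b e m t).2 m
          = qa_orbit b e m (t + 1) := rfl
      simp only [qa_loopC, if_neg hc, hstep]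
      have hcast : ((t : Int) + 1) = ((t + 1 : Nat) : Int) := by push_cast; ring
      rw [hcast, ih (t + 1)]
      cases hidx : PySem.List.index? (qa_orbitList b e m (t + 1) f) (qa_orbit b e m 0) with
      | none => simp
      | some i =>
        simp only [Option.map_some]
        congr 1
        push_cast
        ring

-- B's literal classification dict agrees with the chained conditional
lemma getD_classify (p : Int) :
    ((((PySem.Dict.empty.insert (1 : Int) "singularity").insert 8 "satellite").insert
        24 "cosmos").getD p ("period_" ++ PySem.Int.toStr p)) = qa_classifyC p := by
  unfold qa_classifyC
  by_cases h1 : p = 1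
  · subst h1; rfl
  · by_cases h8 : p = 8
    · subst h8; rfl
    · by_cases h24 : p = 24
      · subst h24; rfl
      · rw [if_neg h1, if_neg h8, if_neg h24]
        have n1 : ((1 : Int) == p) = false := beq_eq_false_iff_ne.mpr (fun h => h1 h.symm)
        have n8 : ((8 : Int) == p) = false := beq_eq_false_iff_ne.mpr (fun h => h8 h.symm)
        have n24 : ((24 : Int) == p) = false := beq_eq_false_iff_ne.mpr (fun h => h24 h.symm)
        simp [PySem.Dict.getD, PySem.Dict.get?, PySem.Dict.insert, PySem.Dict.empty,
          List.find?, n1, n8, n24]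

-- ===== VERDICT (by name: the statement is the Claim_ definition above) =====
theorem qa_orbit_family_spec : Claim_equal_qa_orbit_family := by
  intro b e m max_steps _ hm
  unfold Spec_qa_orbit_family qa_orbit_family qa_orbit_family_alt
  have h0 : (PySem.Int.mod b m, PySem.Int.mod e m) = qa_orbit b e m 0 := rfl
  by_cases hms : max_steps ≤ 0
  · have hA : max_steps.toNat = 0 := by omega
    have hB : (max_steps - 1).toNat = 0 := by omega
    rw [hA, hB]
    simp [qa_loopA, qa_findB]
  · have hfuel : max_steps.toNat = (max_steps - 1).toNat + 1 := by omega
    rw [hfuel]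
    have hempty : (PySem.Dict.empty : PySem.Dict (Int × Int) Int).get?
        (PySem.Int.mod b m, PySem.Int.mod e m) = none := by rfl
    simp only [qa_loopA, hempty]
    have h1 : qa_stepA (PySem.Int.mod b m) (PySem.Int.mod e m) m = qa_orbit b e m 1 := rfl
    rw [h1]
    have hAside := loop_eq b e m hm ((max_steps - 1).toNat) 1
      (PySem.Dict.empty.insert (qa_orbit b e m 0) 0) (le_refl 1)
      (by intro i hi
          have : i = 0 := by omega
          subst this
          simpa using PySem.Dict.get?_insert_self _ _ _)
      (by intro x v hg
          by_cases hxe : x = qa_orbit b e m 0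
          · exact ⟨0, by omega, hxe.symm⟩
          · rw [PySem.Dict.get?_insert_of_ne _ _ hxe] at hg
            simp [PySem.Dict.get?, PySem.Dict.empty] at hg)
      (by intro k hk1 hk2; omega)
    rw [h0]
    simp only [Nat.cast_one] at hAside
    simp only [zero_add]
    rw [hAside]
    -- now evaluate B's stream search
    have hfind := find_eq b e m ((max_steps - 1).toNat) 0 1
    simp only [Nat.zero_add] at hfind
    rw [hfind]
    have hC := loopC_eq_index b e m ((max_steps - 1).toNat) 1
    simp only [Nat.cast_one] at hC
    rw [hC]
    cases hidx : PySem.List.index? (qa_orbitList b e m 1 ((max_steps - 1).toNat))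
        (qa_orbit b e m 0) with
    | none => simp
    | some i => simp [getD_classify]
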